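-- pv_equiv track=rewrite | github.com/Maorazr/ImageProcessing | src/ocrWithMark.py | assign_characters_to_words
-- ===== SOURCE A (Python) =====
-- def assign_characters_to_words(word_rects, char_rects):
--     """
--     Assign each character to the rectangle that represent the word that this character is part of.
--     Characters are sorted according to their appropriate place in the word.
--
--     :param word_rects: A list of 4-tuple representing the rectangles that contain words. Each tuple is (x, y, w, h).
--     :param char_rects: A list of 4-tuple representing the rectangles that contain characters. Each tuple is (x, y, w, h).
--     :return: A dictionary where each key is a word rectangle and each value is a list of the character rectangles that belong to that word.
--     """
--     word_to_chars = {word: [] for word in word_rects}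
--
--     for char in char_rects:
--         for word in word_rects:
--             # Check if the character rectangle is completely contained within the word rectangle
--             if word[0] <= char[0] and word[1] <= char[1] and word[0] + word[2] >= char[0] + char[2] and word[1] + word[
--                 3] >= char[1] + char[3]:
--                 word_to_chars[word].append(char)
--                 break  # If a character can be assigned to a word, we break the loop
--
--     for word, chars in word_to_chars.items():
--         # Sort the characters by their x-coordinate
--         chars.sort(key=lambda char: char[0])
--
--     return word_to_chars
-- ===== SOURCE B (Python) =====
-- def assign_characters_to_words(word_rects, char_rects):
--     def owner(char):
--         # first word rect (in word_rects order) fully containing the char rect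
--         for word in word_rects:
--             if word[0] <= char[0] and word[1] <= char[1] and word[0] + word[2] >= char[0] + char[2] and word[1] + word[3] >= char[1] + char[3]:
--                 return word
--         return None
--
--     ordered = sorted(char_rects, key=lambda c: c[0])   # stable: sorting first makes every group come out sorted
--     owners = [owner(c) for c in ordered]
--     return {w: [c for c, o in zip(ordered, owners) if o == w]
--             for w in dict.fromkeys(word_rects)}
-- ===== Notes on version B (the rewrite author's own statement) =====
-- stated objective: alternative
-- what changed: B sorts the chars once up front and builds each word's group directly as a filter of the pre-sorted list keyed by a precomputed owner per char, instead of A's mutate-a-dict-per-char loop followed by a per-group sort pass.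
import Mathlib
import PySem

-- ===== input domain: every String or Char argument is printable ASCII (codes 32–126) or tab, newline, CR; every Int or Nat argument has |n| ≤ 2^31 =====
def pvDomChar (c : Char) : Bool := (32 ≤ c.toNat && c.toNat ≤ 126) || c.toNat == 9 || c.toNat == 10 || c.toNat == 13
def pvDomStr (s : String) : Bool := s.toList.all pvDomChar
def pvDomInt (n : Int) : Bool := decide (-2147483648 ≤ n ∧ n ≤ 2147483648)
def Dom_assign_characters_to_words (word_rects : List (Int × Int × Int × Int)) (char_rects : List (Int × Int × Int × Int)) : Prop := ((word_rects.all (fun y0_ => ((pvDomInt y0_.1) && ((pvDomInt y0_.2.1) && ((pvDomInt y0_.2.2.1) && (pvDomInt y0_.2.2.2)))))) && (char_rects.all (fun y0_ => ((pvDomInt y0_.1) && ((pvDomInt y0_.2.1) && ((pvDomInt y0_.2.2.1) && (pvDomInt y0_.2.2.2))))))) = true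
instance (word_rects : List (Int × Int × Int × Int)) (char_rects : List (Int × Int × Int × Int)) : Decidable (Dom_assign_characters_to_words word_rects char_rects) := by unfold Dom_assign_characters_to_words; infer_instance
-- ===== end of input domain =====

-- B sorts the chars once up front and builds each word's group as a filter of the pre-sorted
-- list keyed by a precomputed owner per char, instead of A's per-char dict mutation + final
-- per-group sort (same cost; 'alternative' decomposition). Return value only (A returns a dict).

-- the containment test shared by both Pythons, word fully contains char
def pvContains (w c : Int × Int × Int × Int) : Bool :=
  decide (w.1 ≤ c.1) && decide (w.2.1 ≤ c.2.1) &&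
  decide (w.1 + w.2.2.1 ≥ c.1 + c.2.2.1) && decide (w.2.1 + w.2.2.2 ≥ c.2.1 + c.2.2.2)

-- ===== PORT A =====
-- A's inner 'for word in word_rects: … break' for one char
def pvAInner (c : Int × Int × Int × Int) :
    List (Int × Int × Int × Int) →
    PySem.Dict (Int × Int × Int × Int) (List (Int × Int × Int × Int)) →
    PySem.Dict (Int × Int × Int × Int) (List (Int × Int × Int × Int))
  | [], d => d
  | w :: ws, d => if pvContains w c then d.modify w [] (fun l => l ++ [c]) else pvAInner c ws d

def assign_characters_to_words (word_rects : List (Int × Int × Int × Int)) (char_rects : List (Int × Int × Int × Int)) : List (Int × Int × Int × Int × List (Int × Int × Int × Int)) :=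
  let d0 := word_rects.foldl (fun d w => d.insert w ([] : List (Int × Int × Int × Int))) PySem.Dict.empty
  let d1 := char_rects.foldl (fun d c => pvAInner c word_rects d) d0
  d1.items.map (fun kv =>
    (kv.1.1, kv.1.2.1, kv.1.2.2.1, kv.1.2.2.2, PySem.List.sorted kv.2 (fun c => c.1) false))

-- ===== PORT B =====
-- Source B's owner(): first containing word, else None
def pvOwner (wr : List (Int × Int × Int × Int)) (c : Int × Int × Int × Int) : Option (Int × Int × Int × Int) :=
  match wr with
  | [] => none
  | w :: ws => if pvContains w c then some w else pvOwner ws c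

def assign_characters_to_words_alt (word_rects : List (Int × Int × Int × Int)) (char_rects : List (Int × Int × Int × Int)) : List (Int × Int × Int × Int × List (Int × Int × Int × Int)) :=
  let ordered := PySem.List.sorted char_rects (fun c => c.1) false
  let owners := ordered.map (pvOwner word_rects)
  (PySem.List.dedup word_rects).map (fun w =>
    (w.1, w.2.1, w.2.2.1, w.2.2.2,
      ((ordered.zip owners).filter (fun p => decide (p.2 = some w))).map (fun p => p.1)))

-- ===== PRECONDITION & SPEC =====
def Spec_assign_characters_to_words (word_rects : List (Int × Int × Int × Int)) (char_rects : List (Int × Int × Int × Int)) (out : List (Int × Int × Int × Int × List (Int × Int × Int × Int))) : Prop := out = assign_characters_to_words_alt word_rects char_rects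
instance (word_rects : List (Int × Int × Int × Int)) (char_rects : List (Int × Int × Int × Int)) (out : List (Int × Int × Int × Int × List (Int × Int × Int × Int))) : Decidable (Spec_assign_characters_to_words word_rects char_rects out) := by
  unfold Spec_assign_characters_to_words
  letI hA : DecidableEq (Int × List (Int × Int × Int × Int)) := fun a b => instDecidableEqProd a b
  letI hB : DecidableEq (Int × Int × List (Int × Int × Int × Int)) := fun a b => instDecidableEqProd a b
  letI hC : DecidableEq (Int × Int × Int × List (Int × Int × Int × Int)) := fun a b => instDecidableEqProd a b
  letI hD : DecidableEq (Int × Int × Int × Int × List (Int × Int × Int × Int)) := fun a b => instDecidableEqProd a b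
  infer_instance

-- ===== CLAIM (what is proved, stated in full; the proofs are below) =====
def Claim_equal_assign_characters_to_words : Prop := ∀ (word_rects : List (Int × Int × Int × Int)) (char_rects : List (Int × Int × Int × Int)), Dom_assign_characters_to_words word_rects char_rects → Spec_assign_characters_to_words word_rects char_rects (assign_characters_to_words word_rects char_rects)

-- ===== LEMMAS AND PROOFS =====

-- owner returned by pvOwner is one of the word rects
theorem pvOwner_mem (wr : List (Int × Int × Int × Int)) (c w : Int × Int × Int × Int)
    (h : pvOwner wr c = some w) : w ∈ wr := by
  induction wr with
  | nil => simp [pvOwner] at h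
  | cons a ws ih =>
    simp only [pvOwner] at h
    by_cases hc : pvContains a c = true
    · simp [hc] at h; simp [h]
    · simp [hc] at h; exact List.mem_cons_of_mem _ (ih h)

-- A's inner break-loop is exactly "modify at the owner (if any)"
theorem pvAInner_eq (c : Int × Int × Int × Int) (wr : List (Int × Int × Int × Int))
    (d : PySem.Dict (Int × Int × Int × Int) (List (Int × Int × Int × Int))) :
    pvAInner c wr d =
      match pvOwner wr c with
      | none => d
      | some w => d.modify w [] (fun l => l ++ [c]) := by
  induction wr with
  | nil => simp [pvAInner, pvOwner]
  | cons a ws ih =>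
    simp only [pvAInner, pvOwner]
    by_cases hc : pvContains a c = true
    · simp [hc]
    · simp [hc, ih]

-- the init dict maps every key to []
theorem pvGetD_init (wr : List (Int × Int × Int × Int))
    (d : PySem.Dict (Int × Int × Int × Int) (List (Int × Int × Int × Int)))
    (h : ∀ j, d.getD j [] = []) (k : Int × Int × Int × Int) :
    (wr.foldl (fun d w => d.insert w ([] : List (Int × Int × Int × Int))) d).getD k [] = [] := by
  induction wr generalizing d with
  | nil => simpa using h k
  | cons a ws ih =>
    simp only [List.foldl_cons]
    exact ih _ (fun j => by rw [PySem.Dict.getD_insert]; split <;> simp [h])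

-- value at key w after A's char loop: old value ++ chars owned by w, in order
theorem pvGetD_loop (wr : List (Int × Int × Int × Int)) (cr : List (Int × Int × Int × Int))
    (d : PySem.Dict (Int × Int × Int × Int) (List (Int × Int × Int × Int)))
    (w : Int × Int × Int × Int) :
    (cr.foldl (fun d c => pvAInner c wr d) d).getD w [] =
      d.getD w [] ++ cr.filter (fun c => decide (pvOwner wr c = some w)) := by
  induction cr generalizing d with
  | nil => simp
  | cons c cs ih =>
    simp only [List.foldl_cons]
    rw [pvAInner_eq]
    rcases ho : pvOwner wr c with _ | w'
    · simp only [ho]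
      rw [ih]
      simp [List.filter_cons, ho]
    · simp only [ho]
      rw [ih, PySem.Dict.getD_modify]
      by_cases hw : w = w'
      · subst hw; simp [List.filter_cons, ho]
      · simp [List.filter_cons, ho, hw, Ne.symm hw]

-- keys are unchanged by A's char loop (every owner is already a key)
theorem pvKeys_loop (wr : List (Int × Int × Int × Int)) (cr : List (Int × Int × Int × Int))
    (d : PySem.Dict (Int × Int × Int × Int) (List (Int × Int × Int × Int)))
    (h : ∀ w ∈ wr, w ∈ d.keys) :
    (cr.foldl (fun d c => pvAInner c wr d) d).keys = d.keys := by
  induction cr generalizing d with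
  | nil => simp
  | cons c cs ih =>
    simp only [List.foldl_cons]
    rw [pvAInner_eq]
    rcases ho : pvOwner wr c with _ | w'
    · exact ih d h
    · have hmem : w' ∈ d.keys := h w' (pvOwner_mem wr c w' ho)
      have hcont : d.contains w' = true := by
        rw [PySem.Dict.contains_eq_decide_mem_keys]; simpa using hmem
      have hk : (d.modify w' [] (fun l => l ++ [c])).keys = d.keys := by
        rw [PySem.Dict.keys_modify, PySem.Dict.keys_insert_of_contains _ _ hcont]
      rw [ih _ (fun w hw => by rw [hk]; exact h w hw), hk]

-- B's zip/filter/map collapses to a plain filter by owner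
theorem pvZip_filter (l : List (Int × Int × Int × Int))
    (f : (Int × Int × Int × Int) → Option (Int × Int × Int × Int)) (w : Int × Int × Int × Int) :
    ((l.zip (l.map f)).filter (fun p => decide (p.2 = some w))).map (fun p => p.1) =
      l.filter (fun c => decide (f c = some w)) := by
  induction l with
  | nil => simp
  | cons a l ih =>
    simp only [List.map_cons, List.zip_cons_cons, List.filter_cons]
    by_cases h : f a = some w <;> simp [h, ih]

-- comparison used by the stable insertion sort on the x-coordinate
def pvB (a c : Int × Int × Int × Int) : Bool := decide (a.1 < c.1)

theorem pvInsertBy_front (x : Int × Int × Int × Int) (ys : List (Int × Int × Int × Int))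
    (h : ∀ y ∈ ys, pvB x y = true) : PySem.List.insertBy pvB x ys = x :: ys := by
  cases ys with
  | nil => simp [PySem.List.insertBy]
  | cons a ys => simp [PySem.List.insertBy, h a (by simp)]

theorem pvInsertBy_pairwise (x : Int × Int × Int × Int) (ys : List (Int × Int × Int × Int))
    (h : ys.Pairwise (fun u v => u.1 ≤ v.1)) :
    (PySem.List.insertBy pvB x ys).Pairwise (fun u v => u.1 ≤ v.1) := by
  induction ys with
  | nil => simp [PySem.List.insertBy]
  | cons a ys ih =>
    rcases List.pairwise_cons.mp h with ⟨ha, hys⟩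
    by_cases hb : pvB x a = true
    · have hx : x.1 < a.1 := by simpa [pvB] using hb
      simp only [PySem.List.insertBy, hb, if_true]
      refine List.pairwise_cons.mpr ⟨?_, h⟩
      intro y hy
      rcases List.mem_cons.mp hy with rfl | hy
      · exact le_of_lt hx
      · exact le_trans (le_of_lt hx) (ha y hy)
    · have hx : a.1 ≤ x.1 := by simpa [pvB] using hb
      simp only [PySem.List.insertBy, hb]
      refine List.pairwise_cons.mpr ⟨?_, ih hys⟩
      intro y hy
      rcases (PySem.List.mem_insertBy _ _ _ _).mp hy with rfl | hy
      · exact hx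
      · exact ha y hy

theorem pvFilter_insertBy (p : (Int × Int × Int × Int) → Bool) (x : Int × Int × Int × Int)
    (ys : List (Int × Int × Int × Int)) (h : ys.Pairwise (fun u v => u.1 ≤ v.1)) :
    (PySem.List.insertBy pvB x ys).filter p =
      if p x then PySem.List.insertBy pvB x (ys.filter p) else ys.filter p := by
  induction ys with
  | nil => by_cases hx : p x = true <;> simp [PySem.List.insertBy, hx]
  | cons a ys ih =>
    rcases List.pairwise_cons.mp h with ⟨ha, hys⟩
    by_cases hb : pvB x a = true
    · have hx : x.1 < a.1 := by simpa [pvB] using hb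
      have hfront : PySem.List.insertBy pvB x (List.filter p (a :: ys)) = x :: List.filter p (a :: ys) := by
        apply pvInsertBy_front
        intro y hy
        have hmem := List.mem_of_mem_filter hy
        rcases List.mem_cons.mp hmem with rfl | hmem
        · exact hb
        · have hay : a.1 ≤ y.1 := ha y hmem
          simp only [pvB, decide_eq_true_eq]
          omega
      simp only [PySem.List.insertBy, hb, if_true]
      by_cases hpx : p x = true
      · rw [if_pos hpx, hfront, List.filter_cons, if_pos hpx]
      · rw [if_neg hpx, List.filter_cons, if_neg hpx]
    · have hstep : ∀ l, PySem.List.insertBy pvB x (a :: l) = a :: PySem.List.insertBy pvB x l := by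
        intro l; simp [PySem.List.insertBy, hb]
      rw [hstep, List.filter_cons]
      by_cases hpa : p a = true
      · rw [if_pos hpa, ih hys, List.filter_cons, if_pos hpa]
        by_cases hpx : p x = true
        · rw [if_pos hpx, if_pos hpx, hstep]
        · rw [if_neg hpx, if_neg hpx]
      · rw [if_neg hpa, ih hys, List.filter_cons, if_neg hpa]

theorem pvFoldl_filter (p : (Int × Int × Int × Int) → Bool) (xs : List (Int × Int × Int × Int))
    (acc : List (Int × Int × Int × Int)) (h : acc.Pairwise (fun u v => u.1 ≤ v.1)) :
    (xs.foldl (fun acc x => PySem.List.insertBy pvB x acc) acc).filter p =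
      (xs.filter p).foldl (fun acc x => PySem.List.insertBy pvB x acc) (acc.filter p) := by
  induction xs generalizing acc with
  | nil => simp
  | cons x xs ih =>
    simp only [List.foldl_cons, List.filter_cons]
    rw [ih _ (pvInsertBy_pairwise x acc h), pvFilter_insertBy p x acc h]
    split <;> simp

-- the stable sort commutes with filter
theorem pvSorted_filter (p : (Int × Int × Int × Int) → Bool) (xs : List (Int × Int × Int × Int)) :
    (PySem.List.sorted xs (fun c => c.1) false).filter p =
      PySem.List.sorted (xs.filter p) (fun c => c.1) false := by
  rw [PySem.List.sorted_eq_foldl_insertBy, PySem.List.sorted_eq_foldl_insertBy]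
  have := pvFoldl_filter p xs [] (by simp)
  simpa [pvB] using this

-- ===== VERDICT (by name: the statement is the Claim_ definition above) =====
theorem assign_characters_to_words_spec : Claim_equal_assign_characters_to_words := by
  intro wr cr _
  show assign_characters_to_words wr cr = assign_characters_to_words_alt wr cr
  have hkeys0 : (wr.foldl (fun d w => d.insert w ([] : List (Int × Int × Int × Int))) PySem.Dict.empty).keys
      = PySem.List.dedup wr := by
    rw [show (fun (d : PySem.Dict (Int × Int × Int × Int) (List (Int × Int × Int × Int))) (w : Int × Int × Int × Int) => d.insert w ([] : List (Int × Int × Int × Int)))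
        = (fun d x => d.insert x ((fun _ _ => ([] : List (Int × Int × Int × Int))) d x)) from rfl]
    rw [PySem.Dict.keys_foldl_insert]
    simp [PySem.List.dedup_eq_ofList, PySem.Set.update, PySem.Set.ofList]
  have hsub : ∀ w ∈ wr, w ∈ (wr.foldl (fun d w => d.insert w ([] : List (Int × Int × Int × Int))) PySem.Dict.empty).keys := by
    intro w hw
    rw [hkeys0, PySem.List.dedup_eq_ofList]
    exact (PySem.Set.mem_ofList _ _).mpr hw
  have hkeys1 : (cr.foldl (fun d c => pvAInner c wr d)
      (wr.foldl (fun d w => d.insert w ([] : List (Int × Int × Int × Int))) PySem.Dict.empty)).keys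
      = PySem.List.dedup wr := by
    rw [pvKeys_loop wr cr _ hsub, hkeys0]
  have hgetD : ∀ w', (cr.foldl (fun d c => pvAInner c wr d)
      (wr.foldl (fun d w => d.insert w ([] : List (Int × Int × Int × Int))) PySem.Dict.empty)).getD w' []
      = cr.filter (fun c => decide (pvOwner wr c = some w')) := by
    intro w'
    rw [pvGetD_loop, pvGetD_init wr PySem.Dict.empty (fun j => by simp) w']
    simp
  simp only [assign_characters_to_words, assign_characters_to_words_alt]
  rw [PySem.Dict.items_eq_map_keys _
    (by rw [hkeys1, PySem.List.dedup_eq_ofList]; exact PySem.Set.nodup_ofList wr) ([] : List (Int × Int × Int × Int))]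
  rw [hkeys1, List.map_map]
  apply List.map_congr_left
  intro w _
  simp only [Function.comp]
  rw [hgetD w, pvZip_filter, pvSorted_filter]
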